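-- pv_equiv track=rewrite | github.com/Fox-sys/ege-lessons | lesson_6/homework/f02.py | un_regular_result
-- ===== SOURCE A (Python) =====
-- def un_regular_result(info):
--     """Решение без регулярок"""
--     counter = 0
--     for i in info:
--         for j in range(len(i)):
--             if i[j] == 'A' and ('R' in i[j:-1] + i[-1]):
--                 counter += 1
--                 break
--     return counter
-- ===== SOURCE B (Python) =====
-- def un_regular_result(info):
--     """Решение без регулярок"""
--     counter = 0
--     for s in info:
--         seen_a = False
--         for c in s:
--             if seen_a and c == 'R':
--                 counter += 1
--                 break
--             if c == 'A':
--                 seen_a = True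
--     return counter
-- ===== Notes on version B (the rewrite author's own statement) =====
-- stated objective: faster
-- what changed: Replaced the index loop that re-scans the whole tail of the string (substring test on i[j:-1]+i[-1]) at every 'A' with a single left-to-right scan per string that carries a seen-'A' flag and counts on the first 'R' after it.
import Mathlib
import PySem

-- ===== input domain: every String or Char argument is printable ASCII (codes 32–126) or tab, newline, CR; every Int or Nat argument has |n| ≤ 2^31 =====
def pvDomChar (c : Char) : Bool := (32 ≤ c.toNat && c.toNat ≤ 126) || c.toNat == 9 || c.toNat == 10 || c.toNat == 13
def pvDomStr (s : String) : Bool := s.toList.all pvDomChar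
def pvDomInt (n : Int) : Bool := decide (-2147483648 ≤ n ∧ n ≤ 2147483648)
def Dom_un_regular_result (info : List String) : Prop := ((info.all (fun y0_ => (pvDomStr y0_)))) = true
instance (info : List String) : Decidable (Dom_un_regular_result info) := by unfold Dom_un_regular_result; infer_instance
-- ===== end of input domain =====

-- B replaces A's per-index tail re-scan with one left-to-right scan per string carrying a seen-'A' flag (objective: faster).

-- ===== PORT A =====
-- the if-condition of A's inner loop: i[j] == 'A' and ('R' in i[j:-1] + i[-1]);
-- i[-1] is ported with pyGetD (Python evaluates it only after the j-loop runs, so the string is nonempty there)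
def pvAMatch (s : List Char) (j : Int) : Bool :=
  PySem.List.pyGet? s j == some 'A' &&
  PySem.Chars.isIn ['R'] (PySem.List.slice s (some j) (some (-1)) ++ [PySem.List.pyGetD s (-1) ' '])

-- the inner 'for j in range(len(i)): … break' loop: true iff it increments the counter
def pvAInner (js : List Int) (s : List Char) : Bool :=
  match js with
  | [] => false
  | j :: rest => if pvAMatch s j then true else pvAInner rest s

def un_regular_result (info : List String) : Int :=
  info.foldl (fun counter i =>
    if pvAInner (PySem.List.pyRange 0 (PySem.Str.len i) 1) i.toList then counter + 1 else counter) 0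

-- ===== PORT B =====
-- B's inner scan: true at the first 'R' seen after an 'A'
def pvBScan (s : List Char) (seenA : Bool) : Bool :=
  match s with
  | [] => false
  | c :: cs => if seenA && c == 'R' then true else pvBScan cs (seenA || c == 'A')

def un_regular_result_alt (info : List String) : Int :=
  info.foldl (fun counter s => if pvBScan s.toList false then counter + 1 else counter) 0

-- ===== PRECONDITION & SPEC =====
def Spec_un_regular_result (info : List String) (out : Int) : Prop := out = un_regular_result_alt info
instance (info : List String) (out : Int) : Decidable (Spec_un_regular_result info out) := by unfold Spec_un_regular_result; infer_instance

-- ===== CLAIM (what is proved, stated in full; the proofs are below) =====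
def Claim_equal_un_regular_result : Prop := ∀ (info : List String), Dom_un_regular_result info → Spec_un_regular_result info (un_regular_result info)

-- ===== LEMMAS AND PROOFS =====

-- common characterisation: the string has an 'A' with an 'R' somewhere after it
def pvGood (s : List Char) : Bool :=
  match s with
  | [] => false
  | c :: cs => (c == 'A' && cs.contains 'R') || pvGood cs

theorem pvAMatch_oob (s : List Char) (j : Int) (h : (s.length : Int) ≤ j) :
    pvAMatch s j = false := by
  have : PySem.List.pyGet? s j = none := by
    simp only [PySem.List.pyGet?_eq_none_iff]; unfold PySem.Raise.InRange; omega
  simp [pvAMatch, this]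

theorem pvAMatch_eq (s : List Char) (k : Nat) (hk : k < s.length) :
    pvAMatch s (k : Int) = (s[k] == 'A' && (s.drop k).contains 'R') := by
  have hne : s ≠ [] := by intro h; simp [h] at hk
  have hdne : s.drop k ≠ [] := by simp [List.drop_eq_nil_iff]; omega
  unfold pvAMatch
  rw [PySem.List.pyGetD_neg_one s ' ' hne]
  rw [show PySem.List.slice s (some (k:Int)) (some (-1)) = (s.drop k).dropLast from by
    simp [PySem.List.slice, List.dropLast_eq_take, List.length_drop, Nat.min_eq_left hk.le]; omega]
  rw [show s.getLast hne = (s.drop k).getLast hdne from (List.getLast_drop hdne).symm,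
    List.dropLast_append_getLast hdne]
  rw [show PySem.Chars.isIn ['R'] (s.drop k) = (s.drop k).contains 'R' from by
    by_cases hm : 'R' ∈ s.drop k <;>
      simp [hm, List.contains_eq_mem, PySem.Chars.isIn_iff_infix, PySem.Chars.isIn_eq_false_iff,
        List.singleton_infix_iff]]
  simp [PySem.List.pyGet?_natCast, List.getElem?_eq_getElem hk]

theorem pvAMatch_cons_succ (c : Char) (cs : List Char) (k : Nat) :
    pvAMatch (c :: cs) ((k+1 : Nat) : Int) = pvAMatch cs (k : Int) := by
  by_cases hk : k < cs.length
  · rw [pvAMatch_eq (c :: cs) (k+1) (by simpa using hk), pvAMatch_eq cs k hk]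
    simp
  · rw [pvAMatch_oob, pvAMatch_oob] <;> push_cast <;> simp <;> omega

theorem any_pyRange_zero (m : Nat) (f : Int → Bool) :
    (PySem.List.pyRange 0 (m : Int) 1).any f = (List.range m).any (fun k => f (k : Int)) := by
  simp [PySem.List.pyRange_one, List.any_map, Function.comp_def]

theorem pvAInner_eq_any (js : List Int) (s : List Char) :
    pvAInner js s = js.any (fun j => pvAMatch s j) := by
  induction js with
  | nil => rfl
  | cons j rest ih => by_cases h : pvAMatch s j = true <;> simp [pvAInner, ih, h]

theorem pvA_good (s : List Char) :
    (PySem.List.pyRange 0 (s.length : Int) 1).any (fun j => pvAMatch s j) = pvGood s := by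
  induction s with
  | nil => simp [PySem.List.pyRange_one_eq_nil, pvGood]
  | cons c cs ih =>
      rw [any_pyRange_zero] at *
      simp only [List.length_cons, List.range_succ_eq_map, List.any_cons, List.any_map,
        Function.comp_def, Nat.cast_zero]
      rw [List.any_congr rfl (fun k => pvAMatch_cons_succ c cs k), ih,
        show pvAMatch (c :: cs) 0 = (c == 'A' && ((c :: cs).contains 'R')) from
          (by simpa using pvAMatch_eq (c :: cs) 0 (by simp))]
      by_cases hA : c = 'A'
      · subst hA; simp [pvGood]
      · have hf : (c == 'A') = false := beq_eq_false_iff_ne.mpr hA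
        simp [pvGood, hf]

theorem pvB_good (s : List Char) (seenA : Bool) :
    pvBScan s seenA = ((seenA && s.contains 'R') || pvGood s) := by
  induction s generalizing seenA with
  | nil => simp [pvBScan, pvGood]
  | cons c cs ih =>
      simp only [pvBScan, pvGood, List.contains_cons, ih]
      by_cases hR : c = 'R'
      · subst hR
        cases seenA <;> simp [show ('R' == 'A') = false from by decide]
      · have hfr : (c == 'R') = false := beq_eq_false_iff_ne.mpr hR
        have hfr' : ('R' == c) = false := beq_eq_false_iff_ne.mpr (Ne.symm hR)
        by_cases hA : c = 'A'
        · subst hA; cases seenA <;> simp [hfr, hfr']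
        · have hfa : (c == 'A') = false := beq_eq_false_iff_ne.mpr hA
          cases seenA <;> simp [hfr, hfr', hfa]

-- ===== VERDICT (by name: the statement is the Claim_ definition above) =====
theorem un_regular_result_spec : Claim_equal_un_regular_result := by
  intro info _
  unfold Spec_un_regular_result un_regular_result un_regular_result_alt
  congr 1
  funext counter i
  have h1 : pvAInner (PySem.List.pyRange 0 (PySem.Str.len i) 1) i.toList = pvBScan i.toList false := by
    rw [pvAInner_eq_any]
    rw [show PySem.Str.len i = (i.toList.length : Int) from by simp [pysem]]
    rw [pvA_good, pvB_good]
    simp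
  rw [h1]
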